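-- pv_equiv track=rewrite | github.com/AuroraRyan0301/infinipart | render_animode.py | _get_link_descendants
-- ===== SOURCE A (Python) =====
-- def _get_link_descendants(start_link, children_map):
--     """Get all descendant link names of start_link (inclusive)."""
--     result = {start_link}
--     stack = [start_link]
--     while stack:
--         link = stack.pop()
--         for child_link, _joint in children_map.get(link, []):
--             if child_link not in result:
--                 result.add(child_link)
--                 stack.append(child_link)
--     return result
-- ===== SOURCE B (Python) =====
-- def _get_link_descendants(start_link, children_map):
--     """Get all descendant link names of start_link (inclusive).
--
--     Monotone fixed-point iteration: repeatedly add the children of every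
--     link already reached, until a whole round adds nothing new.  A round
--     that grows the set adds at least one new link, and every link that can
--     ever appear is start_link or occurs as a child somewhere in the map,
--     so sum(len(children)) + 1 rounds always suffice to reach the fixpoint.
--     """
--     result = {start_link}
--     for _ in range(1 + sum(len(children) for children in children_map.values())):
--         frontier = {child for link in result for child, _joint in children_map.get(link, [])}
--         if frontier <= result:
--             break
--         result |= frontier
--     return result
-- ===== Notes on version B (the rewrite author's own statement) =====
-- stated objective: alternative
-- what changed: Replaces the explicit-stack worklist (pop a link, push its unseen children) by a round-based monotone fixed-point iteration: each round adds the whole child frontier of the current set and stops when a round adds nothing; no stack and no per-node bookkeeping, at the cost of rescanning the set each round.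
import Mathlib
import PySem

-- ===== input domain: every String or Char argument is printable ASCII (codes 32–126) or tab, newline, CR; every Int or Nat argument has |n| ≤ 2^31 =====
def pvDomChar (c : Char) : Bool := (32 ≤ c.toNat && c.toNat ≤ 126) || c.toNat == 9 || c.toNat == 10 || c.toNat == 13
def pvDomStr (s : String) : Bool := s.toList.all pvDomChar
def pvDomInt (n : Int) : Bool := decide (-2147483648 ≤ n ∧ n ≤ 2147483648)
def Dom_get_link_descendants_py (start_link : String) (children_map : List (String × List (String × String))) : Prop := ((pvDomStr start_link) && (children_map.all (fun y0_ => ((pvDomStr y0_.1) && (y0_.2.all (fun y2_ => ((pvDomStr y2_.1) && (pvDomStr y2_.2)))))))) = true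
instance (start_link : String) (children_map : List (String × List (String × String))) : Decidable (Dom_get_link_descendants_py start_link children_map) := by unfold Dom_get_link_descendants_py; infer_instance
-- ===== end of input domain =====

-- B replaces A's explicit-stack worklist by a round-based monotone fixed-point iteration
-- (an alternative algorithm, same exact result set; not claimed faster).  Both Pythons
-- return a SET, which has no observable element order (hash order is not modelled — see
-- PYSEM), so both ports render the returned set in its canonical sorted order.

-- children_map.get(link, []) (the dict lookup both Pythons perform)
def pvKids (children_map : List (String × List (String × String))) (link : String) : List (String × String) :=
  PySem.Dict.getD (PySem.Dict.mk children_map) link []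

-- ===== PORT A =====
-- start_link together with every name occurring as a child anywhere in the map: every
-- name A's loop can ever see.  The while loop pops one entry per iteration and pushes a
-- name only when it is newly added to result, so it runs at most (pvUniv …).length + 1
-- iterations; the fuel below is therefore provably sufficient and the fueled recursion
-- is exactly Python's unbounded 'while stack' loop.
def pvUniv (start_link : String) (children_map : List (String × List (String × String))) : List String :=
  start_link :: children_map.flatMap (fun p => p.2.map Prod.fst)

-- the while loop; the stack's head is its top (pop takes the head, append pushes a head)
def pvLoopA (children_map : List (String × List (String × String))) :
    Nat → List String → PySem.Set String → PySem.Set String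
  | 0, _, result => result
  | _ + 1, [], result => result
  | n + 1, link :: rest, result =>
      let st := (pvKids children_map link).foldl
        (fun (p : PySem.Set String × List String) cj =>
          if p.1.contains cj.1 then p else (p.1.add cj.1, cj.1 :: p.2))
        (result, rest)
      pvLoopA children_map n st.2 st.1

def get_link_descendants_py (start_link : String) (children_map : List (String × List (String × String))) : List String :=
  PySem.List.sorted
    (pvLoopA children_map ((pvUniv start_link children_map).length + 1) [start_link]
      (PySem.Set.ofList [start_link]))
    (fun x => x) false

-- ===== PORT B =====
-- range(1 + sum(len(children) for children in children_map.values()))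
def pvRounds (children_map : List (String × List (String × String))) : Nat :=
  1 + (PySem.Dict.values (PySem.Dict.mk children_map)).foldl (fun a kids => a + kids.length) 0

-- {child for link in result for child, _joint in children_map.get(link, [])}
def pvFrontier (children_map : List (String × List (String × String))) (result : PySem.Set String) : PySem.Set String :=
  PySem.Set.ofList (result.flatMap (fun link => (pvKids children_map link).map Prod.fst))

-- the bounded for-loop with its early break ('frontier <= result' then 'result |= frontier')
def pvLoopB (children_map : List (String × List (String × String))) :
    Nat → PySem.Set String → PySem.Set String
  | 0, result => result
  | n + 1, result =>
      let frontier := pvFrontier children_map result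
      if frontier.issubset result then result
      else pvLoopB children_map n (result.union frontier)

def get_link_descendants_py_alt (start_link : String) (children_map : List (String × List (String × String))) : List String :=
  PySem.List.sorted
    (pvLoopB children_map (pvRounds children_map) (PySem.Set.ofList [start_link]))
    (fun x => x) false

-- ===== PRECONDITION & SPEC =====
def Spec_get_link_descendants_py (start_link : String) (children_map : List (String × List (String × String))) (out : List String) : Prop := out = get_link_descendants_py_alt start_link children_map
instance (start_link : String) (children_map : List (String × List (String × String))) (out : List String) : Decidable (Spec_get_link_descendants_py start_link children_map out) := by unfold Spec_get_link_descendants_py; infer_instance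

-- ===== CLAIM (what is proved, stated in full; the proofs are below) =====
def Claim_equal_get_link_descendants_py : Prop := ∀ (start_link : String) (children_map : List (String × List (String × String))), Dom_get_link_descendants_py start_link children_map → Spec_get_link_descendants_py start_link children_map (get_link_descendants_py start_link children_map)

-- ===== LEMMAS AND PROOFS =====

-- edge relation of the children map, and reachability: the common specification of both loops
def pvEdge (children_map : List (String × List (String × String))) (a b : String) : Prop :=
  b ∈ (pvKids children_map a).map Prod.fst

def pvReach (children_map : List (String × List (String × String))) (s x : String) : Prop :=
  Relation.ReflTransGen (pvEdge children_map) s x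

theorem pv_length_le_of_nodup_subset (l l' : List String) (h : l.Nodup) (hs : ∀ x ∈ l, x ∈ l') :
    l.length ≤ l'.length := by
  calc l.length = l.toFinset.card := (List.toFinset_card_of_nodup h).symm
    _ ≤ l'.toFinset.card := Finset.card_le_card (by
        intro x hx; rw [List.mem_toFinset] at *; exact hs x hx)
    _ ≤ l'.length := l'.toFinset_card_le

theorem pv_length_lt_of_nodup_ssubset (l l' : List String) (h : l.Nodup) (h' : l'.Nodup)
    (hs : ∀ x ∈ l, x ∈ l') (c : String) (hc : c ∈ l') (hcn : c ∉ l) :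
    l.length < l'.length := by
  rw [← List.toFinset_card_of_nodup h, ← List.toFinset_card_of_nodup h']
  apply Finset.card_lt_card
  constructor
  · intro x hx; rw [List.mem_toFinset] at *; exact hs x hx
  · intro hsup
    exact hcn (List.mem_toFinset.1 (hsup (List.mem_toFinset.2 hc)))

theorem pv_mem_of_nodup_subset_card (l l' : List String) (h : l.Nodup)
    (hs : ∀ x ∈ l, x ∈ l') (hlen : (PySem.List.dedup l').length ≤ l.length) :
    ∀ x ∈ l', x ∈ l := by
  have hd : (PySem.List.dedup l').toFinset = l'.toFinset := by
    ext x; simp [List.mem_toFinset]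
  have hdc : (PySem.List.dedup l').length = l'.toFinset.card := by
    rw [← hd, List.toFinset_card_of_nodup (PySem.List.nodup_dedup l')]
  have hsub : l.toFinset ⊆ l'.toFinset := by
    intro x hx; rw [List.mem_toFinset] at *; exact hs x hx
  have heq : l.toFinset = l'.toFinset := by
    apply Finset.eq_of_subset_of_card_le hsub
    rw [List.toFinset_card_of_nodup h]; omega
  intro x hx
  have : x ∈ l.toFinset := heq ▸ List.mem_toFinset.2 hx
  exact List.mem_toFinset.1 this

theorem pv_getD_cases (children_map : List (String × List (String × String))) (a : String) :
    (PySem.Dict.mk children_map).getD a [] = [] ∨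
    ∃ p ∈ children_map, (PySem.Dict.mk children_map).getD a [] = p.2 := by
  induction children_map with
  | nil => left; simp [PySem.Dict.getD_eq_get?_getD, PySem.Dict.get?]
  | cons hd tl ih =>
    rw [PySem.Dict.getD_eq_get?_getD]
    rw [show (PySem.Dict.mk (hd :: tl)) = PySem.Dict.mk ((hd.1, hd.2) :: tl) by simp]
    rw [PySem.Dict.get?_mk_cons]
    split
    · right; exact ⟨hd, List.mem_cons_self, rfl⟩
    · rw [← PySem.Dict.getD_eq_get?_getD]
      rcases ih with h | ⟨p, hp, he⟩
      · left; exact h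
      · right; exact ⟨p, List.mem_cons_of_mem _ hp, he⟩

theorem pv_kids_sub_univ (start_link : String) (children_map : List (String × List (String × String)))
    (a b : String) (hb : b ∈ (pvKids children_map a).map Prod.fst) :
    b ∈ pvUniv start_link children_map := by
  rcases pv_getD_cases children_map a with h | ⟨p, hp, he⟩
  · rw [pvKids, h] at hb; simp at hb
  · rw [pvKids, he] at hb
    simp only [pvUniv, List.mem_cons, List.mem_flatMap]
    right; exact ⟨p, hp, hb⟩

theorem pv_foldl_len (L : List (List (String × String))) :
    ∀ a : Nat, L.foldl (fun a kids => a + kids.length) a = a + (L.map List.length).sum := by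
  induction L with
  | nil => simp
  | cons y ys ih => intro a; simp only [List.foldl_cons, List.map_cons, List.sum_cons, ih]; omega

theorem pv_rounds_eq (children_map : List (String × List (String × String))) (start_link : String) :
    pvRounds children_map = (pvUniv start_link children_map).length := by
  unfold pvRounds pvUniv
  rw [PySem.Dict.values_mk, pv_foldl_len, List.length_cons, List.length_flatMap]
  simp [List.map_map, Function.comp_def]
  omega

theorem pv_ofList_singleton (s : String) : PySem.Set.ofList [s] = [s] := by
  simp [PySem.Set.ofList, PySem.Set.add, PySem.Set.contains]

theorem pv_foldA_spec (kids : List (String × String)) :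
    ∀ (res : PySem.Set String) (st : List String), res.Nodup →
    (kids.foldl (fun (p : PySem.Set String × List String) cj =>
        if p.1.contains cj.1 then p else (p.1.add cj.1, cj.1 :: p.2)) (res, st)).1.Nodup ∧
    ((kids.foldl (fun (p : PySem.Set String × List String) cj =>
        if p.1.contains cj.1 then p else (p.1.add cj.1, cj.1 :: p.2)) (res, st)).1.length + st.length
      = res.length + (kids.foldl (fun (p : PySem.Set String × List String) cj =>
        if p.1.contains cj.1 then p else (p.1.add cj.1, cj.1 :: p.2)) (res, st)).2.length) ∧
    (∀ x, x ∈ (kids.foldl (fun (p : PySem.Set String × List String) cj =>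
        if p.1.contains cj.1 then p else (p.1.add cj.1, cj.1 :: p.2)) (res, st)).1
      ↔ x ∈ res ∨ x ∈ kids.map Prod.fst) ∧
    (∀ x, x ∈ (kids.foldl (fun (p : PySem.Set String × List String) cj =>
        if p.1.contains cj.1 then p else (p.1.add cj.1, cj.1 :: p.2)) (res, st)).2
      ↔ x ∈ st ∨ (x ∈ kids.map Prod.fst ∧ x ∉ res)) := by
  induction kids with
  | nil => intro res st hn; refine ⟨hn, by simp, by simp, by simp⟩
  | cons cj tl ih =>
    intro res st hn
    simp only [List.foldl_cons]
    by_cases hc : cj.1 ∈ res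
    · have hcb : res.contains cj.1 = true := (PySem.Set.contains_iff res cj.1).2 hc
      rw [if_pos hcb]
      obtain ⟨h1, h2, h3, h4⟩ := ih res st hn
      refine ⟨h1, h2, ?_, ?_⟩
      · intro x; rw [h3]
        simp only [List.map_cons, List.mem_cons]
        constructor
        · rintro (h | h)
          · exact Or.inl h
          · exact Or.inr (Or.inr h)
        · rintro (h | rfl | h)
          · exact Or.inl h
          · exact Or.inl hc
          · exact Or.inr h
      · intro x; rw [h4]
        simp only [List.map_cons, List.mem_cons]
        constructor
        · rintro (h | ⟨h, hr⟩)
          · exact Or.inl h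
          · exact Or.inr ⟨Or.inr h, hr⟩
        · rintro (h | ⟨rfl | h, hr⟩)
          · exact Or.inl h
          · exact absurd hc hr
          · exact Or.inr ⟨h, hr⟩
    · have hcb : res.contains cj.1 = false := by
        rw [← Bool.not_eq_true, PySem.Set.contains_iff]; exact hc
      rw [hcb]; simp only [Bool.false_eq_true, if_false]
      have hadd : res.add cj.1 = res ++ [cj.1] := by
        simp [PySem.Set.add]; exact hc
      have hnd : (res.add cj.1).Nodup := PySem.Set.nodup_add res cj.1 hn
      obtain ⟨h1, h2, h3, h4⟩ := ih (res.add cj.1) (cj.1 :: st) hnd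
      have hlen : (res.add cj.1).length = res.length + 1 := by rw [hadd]; simp
      refine ⟨h1, by simp only [List.length_cons] at h2 ⊢; omega, ?_, ?_⟩
      · intro x; rw [h3, PySem.Set.mem_add]
        simp only [List.map_cons, List.mem_cons]; tauto
      · intro x; rw [h4, PySem.Set.mem_add]
        simp only [List.map_cons, List.mem_cons]
        constructor
        · rintro (⟨rfl | h⟩ | ⟨h, hr⟩)
          · exact Or.inr ⟨Or.inl rfl, hc⟩
          · exact Or.inl h
          · exact Or.inr ⟨Or.inr h, fun hx => hr (Or.inl hx)⟩
        · rintro (h | ⟨rfl | h, hr⟩)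
          · exact Or.inl (Or.inr h)
          · exact Or.inl (Or.inl rfl)
          · by_cases hx : x = cj.1
            · exact Or.inl (Or.inl hx)
            · exact Or.inr ⟨h, fun hh => (hh.elim hr hx)⟩

theorem pv_loopA_sound (children_map : List (String × List (String × String))) (s : String) :
    ∀ (n : Nat) (stack : List String) (res : PySem.Set String), res.Nodup →
    (∀ x ∈ res, pvReach children_map s x) → (∀ x ∈ stack, x ∈ res) →
    ∀ x ∈ pvLoopA children_map n stack res, pvReach children_map s x := by
  intro n
  induction n with
  | zero => intro stack res _ hr _ x hx; exact hr x hx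
  | succ n ih =>
    intro stack res hn hr hs x hx
    match stack with
    | [] => exact hr x hx
    | link :: rest =>
      simp only [pvLoopA] at hx
      obtain ⟨h1, _h2, h3, h4⟩ := pv_foldA_spec (pvKids children_map link) res rest hn
      refine ih _ _ h1 ?_ ?_ x hx
      · intro y hy
        rcases (h3 y).1 hy with h | h
        · exact hr y h
        · exact Relation.ReflTransGen.tail (hr link (hs link (List.mem_cons_self))) h
      · intro y hy
        rcases (h4 y).1 hy with h | ⟨h, _⟩
        · exact (h3 y).2 (Or.inl (hs y (List.mem_cons_of_mem _ h)))
        · exact (h3 y).2 (Or.inr h)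

theorem pv_loopA_closed (children_map : List (String × List (String × String))) (s : String) :
    ∀ (n : Nat) (stack : List String) (res : PySem.Set String), res.Nodup →
    (∀ x ∈ res, x ∈ pvUniv s children_map) → (∀ x ∈ stack, x ∈ res) →
    (∀ a ∈ res, a ∉ stack → ∀ b ∈ (pvKids children_map a).map Prod.fst, b ∈ res) →
    (pvUniv s children_map).length + 1 + stack.length ≤ n + res.length →
    (pvLoopA children_map n stack res).Nodup ∧
    (∀ x ∈ res, x ∈ pvLoopA children_map n stack res) ∧
    (∀ a ∈ pvLoopA children_map n stack res, ∀ b ∈ (pvKids children_map a).map Prod.fst,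
      b ∈ pvLoopA children_map n stack res) := by
  intro n
  induction n with
  | zero =>
    intro stack res hn hu _ _ hfuel
    have := pv_length_le_of_nodup_subset res (pvUniv s children_map) hn hu
    simp only [pvLoopA] at *
    omega
  | succ n ih =>
    intro stack res hn hu hs hcl hfuel
    match stack with
    | [] =>
      simp only [pvLoopA]
      exact ⟨hn, fun x hx => hx, fun a ha b hb => hcl a ha (List.not_mem_nil) b hb⟩
    | link :: rest =>
      simp only [pvLoopA]
      obtain ⟨h1, h2, h3, h4⟩ := pv_foldA_spec (pvKids children_map link) res rest hn
      set P := (pvKids children_map link).foldl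
        (fun (p : PySem.Set String × List String) cj =>
          if p.1.contains cj.1 then p else (p.1.add cj.1, cj.1 :: p.2)) (res, rest) with hP
      have hu' : ∀ x ∈ P.1, x ∈ pvUniv s children_map := by
        intro x hx
        rcases (h3 x).1 hx with h | h
        · exact hu x h
        · exact pv_kids_sub_univ s children_map link x h
      have hs' : ∀ x ∈ P.2, x ∈ P.1 := by
        intro x hx
        rcases (h4 x).1 hx with h | ⟨h, _⟩
        · exact (h3 x).2 (Or.inl (hs x (List.mem_cons_of_mem _ h)))
        · exact (h3 x).2 (Or.inr h)
      have hcl' : ∀ a ∈ P.1, a ∉ P.2 →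
          ∀ b ∈ (pvKids children_map a).map Prod.fst, b ∈ P.1 := by
        intro a ha hnotst b hb
        have hstep : a ∈ res → a ≠ link → b ∈ P.1 := by
          intro hares hal
          have hnr : a ∉ rest := fun hr => hnotst ((h4 a).2 (Or.inl hr))
          have hold : a ∉ link :: rest := by
            intro hmem
            rcases List.mem_cons.1 hmem with h | h
            · exact hal h
            · exact hnr h
          exact (h3 b).2 (Or.inl (hcl a hares hold b hb))
        rcases (h3 a).1 ha with hares | hakid
        · by_cases hal : a = link
          · exact (h3 b).2 (Or.inr (hal ▸ hb))
          · exact hstep hares hal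
        · by_cases hares : a ∈ res
          · by_cases hal : a = link
            · exact (h3 b).2 (Or.inr (hal ▸ hb))
            · exact hstep hares hal
          · exact absurd ((h4 a).2 (Or.inr ⟨hakid, hares⟩)) hnotst
      have hfuel' : (pvUniv s children_map).length + 1 + P.2.length ≤ n + P.1.length := by
        simp only [List.length_cons] at hfuel
        omega
      obtain ⟨g1, g2, g3⟩ := ih P.2 P.1 h1 hu' hs' hcl' hfuel'
      exact ⟨g1, fun x hx => g2 x ((h3 x).2 (Or.inl hx)), g3⟩

theorem pv_frontier_mem (children_map : List (String × List (String × String)))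
    (res : PySem.Set String) (x : String) :
    x ∈ pvFrontier children_map res ↔ ∃ l ∈ res, pvEdge children_map l x := by
  rw [pvFrontier, PySem.Set.mem_ofList, List.mem_flatMap]
  simp only [pvEdge]

theorem pv_loopB_sound (children_map : List (String × List (String × String))) (s : String) :
    ∀ (n : Nat) (res : PySem.Set String), res.Nodup →
    (∀ x ∈ res, pvReach children_map s x) →
    ∀ x ∈ pvLoopB children_map n res, pvReach children_map s x := by
  intro n
  induction n with
  | zero => intro res _ hr x hx; exact hr x hx
  | succ n ih =>
    intro res hn hr x hx
    simp only [pvLoopB] at hx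
    split at hx
    · exact hr x hx
    · refine ih _ (PySem.Set.nodup_union res _ hn) ?_ x hx
      intro y hy
      rcases (PySem.Set.mem_union res _ y).1 hy with h | h
      · exact hr y h
      · obtain ⟨l, hl, he⟩ := (pv_frontier_mem children_map res y).1 h
        exact Relation.ReflTransGen.tail (hr l hl) he

theorem pv_loopB_closed (children_map : List (String × List (String × String))) (s : String) :
    ∀ (n : Nat) (res : PySem.Set String), res.Nodup →
    (∀ x ∈ res, x ∈ pvUniv s children_map) →
    (PySem.List.dedup (pvUniv s children_map)).length ≤ n + res.length →
    (pvLoopB children_map n res).Nodup ∧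
    (∀ x ∈ res, x ∈ pvLoopB children_map n res) ∧
    (∀ a ∈ pvLoopB children_map n res, ∀ b ∈ (pvKids children_map a).map Prod.fst,
      b ∈ pvLoopB children_map n res) := by
  intro n
  induction n with
  | zero =>
    intro res hn hu hfuel
    simp only [pvLoopB]
    have huniv : ∀ x ∈ pvUniv s children_map, x ∈ res := by
      refine pv_mem_of_nodup_subset_card res (pvUniv s children_map) hn hu (by omega)
    exact ⟨hn, fun x hx => hx, fun a ha b hb =>
      huniv b (pv_kids_sub_univ s children_map a b hb)⟩
  | succ n ih =>
    intro res hn hu hfuel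
    simp only [pvLoopB]
    split
    · next hsub =>
      refine ⟨hn, fun x hx => hx, ?_⟩
      intro a ha b hb
      have : b ∈ pvFrontier children_map res :=
        (pv_frontier_mem children_map res b).2 ⟨a, ha, hb⟩
      exact (PySem.Set.issubset_iff _ res).1 hsub b this
    · next hsub =>
      have hn' : (res.union (pvFrontier children_map res)).Nodup :=
        PySem.Set.nodup_union res _ hn
      have hu' : ∀ x ∈ res.union (pvFrontier children_map res), x ∈ pvUniv s children_map := by
        intro x hx
        rcases (PySem.Set.mem_union res _ x).1 hx with h | h
        · exact hu x h
        · obtain ⟨l, _, he⟩ := (pv_frontier_mem children_map res x).1 h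
          exact pv_kids_sub_univ s children_map l x he
      have hgrow : res.length < (res.union (pvFrontier children_map res)).length := by
        have : ¬ ∀ x ∈ pvFrontier children_map res, x ∈ res := by
          intro hall
          exact hsub ((PySem.Set.issubset_iff _ res).2 hall)
        push_neg at this
        obtain ⟨c, hc, hcn⟩ := this
        exact pv_length_lt_of_nodup_ssubset res _ hn hn'
          (fun x hx => (PySem.Set.mem_union res _ x).2 (Or.inl hx)) c
          ((PySem.Set.mem_union res _ c).2 (Or.inr hc)) hcn
      obtain ⟨g1, g2, g3⟩ := ih (res.union (pvFrontier children_map res)) hn' hu' (by omega)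
      exact ⟨g1, fun x hx => g2 x ((PySem.Set.mem_union res _ x).2 (Or.inl hx)), g3⟩

theorem pv_mem_iff_reach (children_map : List (String × List (String × String))) (s : String)
    (out : List String) (hstart : s ∈ out)
    (hsound : ∀ x ∈ out, pvReach children_map s x)
    (hclosed : ∀ a ∈ out, ∀ b ∈ (pvKids children_map a).map Prod.fst, b ∈ out) :
    ∀ x, x ∈ out ↔ pvReach children_map s x := by
  intro x
  constructor
  · exact hsound x
  · intro h
    induction h with
    | refl => exact hstart
    | tail _ he ih => exact hclosed _ ih _ he

theorem pv_ports_agree (start_link : String) (children_map : List (String × List (String × String))) :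
    get_link_descendants_py start_link children_map = get_link_descendants_py_alt start_link children_map := by
  unfold get_link_descendants_py get_link_descendants_py_alt
  have h0 := pv_ofList_singleton start_link
  have hn0 : (PySem.Set.ofList [start_link]).Nodup := PySem.Set.nodup_ofList _
  have hm0 : ∀ x ∈ PySem.Set.ofList [start_link], x = start_link := by
    rw [h0]; intro x hx; simpa using hx
  have hu0 : ∀ x ∈ PySem.Set.ofList [start_link], x ∈ pvUniv start_link children_map := by
    intro x hx; rw [hm0 x hx]; exact List.mem_cons_self
  have hlen0 : (PySem.Set.ofList [start_link]).length = 1 := by rw [h0]; rfl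
  -- A side
  obtain ⟨hA1, hA2, hA3⟩ := pv_loopA_closed children_map start_link
    ((pvUniv start_link children_map).length + 1) [start_link] (PySem.Set.ofList [start_link])
    hn0 hu0
    (by intro x hx; rw [h0]; exact hx)
    (by intro a ha hnot; exact absurd (List.mem_singleton.2 (hm0 a ha)) hnot)
    (by simp only [List.length_cons, List.length_nil, hlen0]; omega)
  have hAs := pv_loopA_sound children_map start_link
    ((pvUniv start_link children_map).length + 1) [start_link] (PySem.Set.ofList [start_link])
    hn0
    (by intro x hx; rw [hm0 x hx]; exact Relation.ReflTransGen.refl)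
    (by intro x hx; rw [h0]; exact hx)
  have hAmem := pv_mem_iff_reach children_map start_link _
    (hA2 start_link (by rw [h0]; exact List.mem_cons_self)) hAs hA3
  -- B side
  have hdu : (PySem.List.dedup (pvUniv start_link children_map)).length
      ≤ (pvUniv start_link children_map).length :=
    pv_length_le_of_nodup_subset _ _ (PySem.List.nodup_dedup _)
      (fun x hx => (PySem.List.mem_dedup _ _).1 hx)
  obtain ⟨hB1, hB2, hB3⟩ := pv_loopB_closed children_map start_link
    (pvRounds children_map) (PySem.Set.ofList [start_link]) hn0 hu0
    (by rw [pv_rounds_eq children_map start_link, hlen0]; omega)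
  have hBs := pv_loopB_sound children_map start_link (pvRounds children_map)
    (PySem.Set.ofList [start_link]) hn0
    (by intro x hx; rw [hm0 x hx]; exact Relation.ReflTransGen.refl)
  have hBmem := pv_mem_iff_reach children_map start_link _
    (hB2 start_link (by rw [h0]; exact List.mem_cons_self)) hBs hB3
  -- same set, both nodup ⇒ permutation ⇒ equal sorted lists
  have hperm := (List.perm_ext_iff_of_nodup hA1 hB1).2
    (fun a => (hAmem a).trans ((hBmem a).symm))
  exact PySem.List.sorted_eq_sorted_of_perm _ _ (fun x => x) (fun _ _ h => h) hperm

-- ===== VERDICT (by name: the statement is the Claim_ definition above) =====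
theorem get_link_descendants_py_spec : Claim_equal_get_link_descendants_py := by
  intro start_link children_map _
  unfold Spec_get_link_descendants_py
  exact pv_ports_agree start_link children_map
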